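-- pv_equiv track=rewrite | github.com/Nghia03092004/nghia03092004.github.io | project_euler_unified/problem_921/solution.py | sieve_omega
-- ===== SOURCE A (Python) =====
-- def sieve_omega(N: int) -> list:
--     """Compute Omega(n) for n = 0..N using a sieve."""
--     omega = [0] * (N + 1)
--     for p in range(2, N + 1):
--         if omega[p] == 0:  # p is prime
--             pk = p
--             while pk <= N:
--                 for m in range(pk, N + 1, pk):
--                     omega[m] += 1
--                 pk *= p
--     return omega
-- ===== SOURCE B (Python) =====
-- def sieve_omega(N: int) -> list:
--     """Compute Omega(n) for n = 0..N: smallest-prime-factor table, then the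
--     DP recurrence omega[n] = omega[n // spf[n]] + 1."""
--     spf = [0] * (N + 1)
--     for i in range(2, N + 1):
--         if spf[i] == 0:  # i is prime
--             for j in range(i, N + 1, i):
--                 if spf[j] == 0:
--                     spf[j] = i
--     omega = [0] * (N + 1)
--     for i in range(2, N + 1):
--         omega[i] = omega[i // spf[i]] + 1
--     return omega
-- ===== Notes on version B (the rewrite author's own statement) =====
-- stated objective: alternative
-- what changed: Instead of incrementing every multiple of every prime power (one pass per prime power), B sieves a smallest-prime-factor table (one conditional pass per prime) and then fills omega in a single O(N) dynamic-programming pass via omega[n] = omega[n // spf[n]] + 1.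
import Mathlib
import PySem

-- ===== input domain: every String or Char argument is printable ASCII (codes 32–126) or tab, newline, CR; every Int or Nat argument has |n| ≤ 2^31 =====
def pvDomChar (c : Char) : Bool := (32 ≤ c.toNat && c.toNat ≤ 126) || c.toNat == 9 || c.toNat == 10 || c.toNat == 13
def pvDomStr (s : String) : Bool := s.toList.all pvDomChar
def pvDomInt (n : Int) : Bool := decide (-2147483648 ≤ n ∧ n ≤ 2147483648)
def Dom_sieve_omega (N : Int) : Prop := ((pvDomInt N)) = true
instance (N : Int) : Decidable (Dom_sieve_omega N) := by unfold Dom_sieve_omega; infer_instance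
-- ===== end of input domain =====

-- B replaces A's per-prime-power increment passes by a smallest-prime-factor
-- table plus the recurrence omega[n] = omega[n // spf[n]] + 1 (objective:
-- alternative algorithm, similar measured cost).

-- ===== PORT A =====
-- inner 'for m in range(pk, N + 1, pk): omega[m] += 1'
-- (every index m lies in [pk, N] ⊆ [0, om.length), so set/getD are exact)
def pvAddMult (N pk : Int) (om : List Int) : List Int :=
  (PySem.List.pyRange pk (N + 1) pk).foldl
    (fun om m => om.set m.toNat (om.getD m.toNat 0 + 1)) om

-- 'pk = p; while pk <= N: …; pk *= p'  (the '2 ≤ p ∧ 1 ≤ pk' conjuncts only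
-- make termination provable; they hold at every call the outer loop makes)
def pvPowLoop (N p pk : Int) (om : List Int) : List Int :=
  if h : pk ≤ N ∧ 2 ≤ p ∧ 1 ≤ pk then
    pvPowLoop N p (pk * p) (pvAddMult N pk om)
  else om
termination_by (N + 1 - pk).toNat
decreasing_by
  have h1 : pk + 1 ≤ pk * p := by nlinarith [h.1, h.2.1, h.2.2]
  omega

def sieve_omega (N : Int) : List Int :=
  (PySem.List.pyRange 2 (N + 1) 1).foldl
    (fun om p => if om.getD p.toNat 0 == 0 then pvPowLoop N p p om else om)
    (List.replicate (N + 1).toNat 0)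

-- ===== PORT B =====
def sieve_omega_alt (N : Int) : List Int :=
  let spf :=
    (PySem.List.pyRange 2 (N + 1) 1).foldl
      (fun s i => if s.getD i.toNat 0 == 0 then
          (PySem.List.pyRange i (N + 1) i).foldl
            (fun s j => if s.getD j.toNat 0 == 0 then s.set j.toNat i else s) s
        else s)
      (List.replicate (N + 1).toNat 0)
  (PySem.List.pyRange 2 (N + 1) 1).foldl
    (fun om i =>
      om.set i.toNat (om.getD (PySem.Int.floordiv i (spf.getD i.toNat 0)).toNat 0 + 1))
    (List.replicate (N + 1).toNat 0)

-- ===== PRECONDITION & SPEC =====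
def Spec_sieve_omega (N : Int) (out : List Int) : Prop := out = sieve_omega_alt N
instance (N : Int) (out : List Int) : Decidable (Spec_sieve_omega N out) := by unfold Spec_sieve_omega; infer_instance

-- ===== CLAIM (what is proved, stated in full; the proofs are below) =====
def Claim_equal_sieve_omega : Prop := ∀ (N : Int), Dom_sieve_omega N → Spec_sieve_omega N (sieve_omega N)

-- ===== LEMMAS AND PROOFS =====
-- Both sides are shown pointwise equal to Ω(j) = pvOm j: A via the invariant
-- pvG (number of prime-power divisors with prime < a), B via the spf-table
-- invariant pvM and the recurrence pvOm_rec.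

theorem pv_getD_set (l : List Int) (n m : ℕ) (v : Int) :
    (l.set n v).getD m 0 = if m = n ∧ n < l.length then v else l.getD m 0 := by
  simp only [List.getD_eq_getElem?_getD, List.getElem?_set]
  by_cases h1 : n = m
  · subst h1
    by_cases h2 : n < l.length
    · simp [h2]
    · have hn : l[n]? = none := by rw [List.getElem?_eq_none_iff]; omega
      simp [h2]
  · have h3 : ¬(m = n ∧ n < l.length) := fun hc => h1 hc.1.symm
    simp [h1, h3]

theorem pv_getD_replicate (L m : ℕ) : (List.replicate L (0 : Int)).getD m 0 = 0 := by
  simp only [List.getD_eq_getElem?_getD, List.getElem?_replicate]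
  split <;> simp

theorem pv_foldl_length {α : Type} (f : List Int → α → List Int)
    (h : ∀ s x, (f s x).length = s.length) (l : List α) (s : List Int) :
    (l.foldl f s).length = s.length := by
  induction l generalizing s with
  | nil => rfl
  | cons x t ih => simp only [List.foldl_cons]; rw [ih, h]

theorem pv_pyRange_nodup (a b s : Int) (hs : 0 < s) : (PySem.List.pyRange a b s).Nodup := by
  rw [PySem.List.pyRange_of_pos a b hs]
  refine (List.nodup_range).map ?_
  intro x y hxy
  have h1 : s * (x:Int) = s * y := by linarith
  have h2 := mul_left_cancel₀ (by omega : (s:Int) ≠ 0) h1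
  exact_mod_cast h2

theorem pvAddMult_length (N pk : Int) (om : List Int) : (pvAddMult N pk om).length = om.length :=
  pv_foldl_length _ (fun s x => List.length_set ..) _ om

theorem pv_incr_getD (ms : List Int) : ∀ (om : List Int) (j : ℕ),
    (∀ m ∈ ms, 0 ≤ m ∧ m.toNat < om.length) →
    ((ms.foldl (fun om m => om.set m.toNat (om.getD m.toNat 0 + 1)) om).getD j 0)
      = om.getD j 0 + ((ms.countP (fun m => m == ((j : ℕ) : Int))) : Int) := by
  induction ms with
  | nil => intro om j _; simp
  | cons m t ih =>
    intro om j h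
    obtain ⟨hm0, hml⟩ := h m (by simp)
    simp only [List.foldl_cons, List.countP_cons]
    rw [ih _ j (by intro x hx; have := h x (by simp [hx]); simpa [List.length_set] using this)]
    rw [pv_getD_set]
    by_cases hj : m.toNat = j
    · have hm : m = ((j:ℕ):Int) := by omega
      subst hm
      simp only [Int.toNat_natCast] at hml ⊢
      simp only [hml, and_true, beq_self_eq_true, if_pos trivial]
      push_cast; ring
    · have hne : m ≠ ((j:ℕ):Int) := by omega
      rw [if_neg (by intro hc; exact hj hc.1.symm)]
      simp [hne]

theorem pvAddMult_getD (N pk : Int) (hpk : 1 ≤ pk) (om : List Int)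
    (hlen : om.length = (N + 1).toNat) (j : ℕ) :
    (pvAddMult N pk om).getD j 0
      = om.getD j 0 + (if 1 ≤ j ∧ (j : Int) ≤ N ∧ pk ∣ (j : Int) then 1 else 0) := by
  have hmem := fun x => PySem.List.mem_pyRange_iff_of_pos (a := pk) (b := N+1) (by omega : (0:Int) < pk) x
  rw [pvAddMult, pv_incr_getD _ om j (by
    intro m hm
    have h := (hmem m).mp hm
    constructor
    · omega
    · rw [hlen]; omega)]
  congr 1
  have hcount : (PySem.List.pyRange pk (N+1) pk).countP (fun m => m == ((j : ℕ) : Int))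
      = ((PySem.List.pyRange pk (N+1) pk).count ((j : ℕ) : Int)) := rfl
  rw [hcount]
  by_cases hin : ((j:ℕ):Int) ∈ PySem.List.pyRange pk (N+1) pk
  · rw [List.count_eq_one_of_mem (pv_pyRange_nodup _ _ _ (by omega)) hin]
    have h := (hmem _).mp hin
    have hdvd : pk ∣ (j:Int) := by
      obtain ⟨c, hc⟩ := h.2.2
      exact ⟨c + 1, by linarith⟩
    rw [if_pos ⟨by omega, by omega, hdvd⟩]
    simp
  · rw [List.count_eq_zero_of_not_mem hin]
    rw [if_neg (by
      intro ⟨h1, h2, h3⟩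
      exact hin ((hmem _).mpr ⟨Int.le_of_dvd (by omega) h3, by omega, (dvd_sub_right h3).mpr dvd_rfl⟩))]
    simp

theorem pvPowLoop_length (N p pk : Int) (om : List Int) :
    (pvPowLoop N p pk om).length = om.length := by
  induction pk, om using pvPowLoop.induct (N := N) (p := p) with
  | case1 pk om h ih => rw [pvPowLoop, dif_pos h, ih, pvAddMult_length]
  | case2 pk om h => rw [pvPowLoop, dif_neg h]

theorem pvPowLoop_getD (P : ℕ) (hP : P.Prime) (N : Int) (k : ℕ) :
    ∀ (e : ℕ) (om : List Int), 1 ≤ e → (N + 1 - (P:Int)^e).toNat ≤ k →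
    om.length = (N + 1).toNat → ∀ (j : ℕ),
    (pvPowLoop N (P : Int) ((P : Int) ^ e) om).getD j 0
      = om.getD j 0 + (if 1 ≤ j ∧ (j : Int) ≤ N
          then ((Finset.Icc e (padicValNat P j)).card : Int) else 0) := by
  induction k with
  | zero =>
    intro e om he hk hlen j
    have hnle : ¬ ((P:Int)^e ≤ N) := by omega
    rw [pvPowLoop, dif_neg (by tauto)]
    split_ifs with hcond
    · -- card = 0 : no k ≥ e with P^k ∣ j since P^e > N ≥ j
      have hempty : Finset.Icc e (padicValNat P j) = ∅ := by
        rw [Finset.Icc_eq_empty_iff]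
        intro hle
        have hdvd : P ^ e ∣ j := by
          rw [← Nat.factorization_def j hP] at hle
          exact (hP.pow_dvd_iff_le_factorization (by omega)).mpr hle
        have := Nat.le_of_dvd (by omega) hdvd
        have hc : ((P:Int))^e ≤ (j:Int) := by exact_mod_cast this
        omega
      simp [hempty]
    · simp
  | succ k ih =>
    intro e om he hk hlen j
    by_cases hle : (P:Int)^e ≤ N
    · have hP2 : (2:Int) ≤ (P:Int) := by exact_mod_cast hP.two_le
      have hpk1 : (1:Int) ≤ (P:Int)^e := one_le_pow₀ (by omega)
      rw [pvPowLoop, dif_pos ⟨hle, hP2, hpk1⟩]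
      have hstep : (P:Int)^e * (P:Int) = (P:Int)^(e+1) := (pow_succ _ _).symm
      rw [hstep]
      have hmeas : (N + 1 - (P:Int)^(e+1)).toNat ≤ k := by
        have : (P:Int)^e + 1 ≤ (P:Int)^(e+1) := by
          rw [pow_succ]; nlinarith
        omega
      rw [ih (e+1) _ (by omega) hmeas (by rw [pvAddMult_length, hlen]) j]
      rw [pvAddMult_getD N _ hpk1 om hlen j]
      split_ifs with h1 h2 h3
      · -- P^e divides j : one more increment, Icc shrinks by one
        have hdvdN : P ^ e ∣ j := by exact_mod_cast h1.2.2
        have hev : e ≤ padicValNat P j := by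
          rw [← Nat.factorization_def j hP]
          exact (hP.pow_dvd_iff_le_factorization (by omega)).mp hdvdN
        have hcard : (Finset.Icc e (padicValNat P j)).card
            = (Finset.Icc (e+1) (padicValNat P j)).card + 1 := by
          rw [Nat.card_Icc, Nat.card_Icc]; omega
        rw [hcard]; push_cast; ring
      · exact absurd ⟨h1.1, h1.2.1⟩ h2
      · -- P^e does not divide j : both intervals empty
        have hnd : ¬ (e ≤ padicValNat P j) := by
          intro hle2
          have hdvd : P ^ e ∣ j := by
            rw [← Nat.factorization_def j hP] at hle2
            exact (hP.pow_dvd_iff_le_factorization (by omega)).mpr hle2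
          exact h1 ⟨h3.1, h3.2, by exact_mod_cast Int.natCast_dvd_natCast.mpr hdvd⟩
        have hcard : (Finset.Icc (e+1) (padicValNat P j)).card
            = (Finset.Icc e (padicValNat P j)).card := by
          rw [Nat.card_Icc, Nat.card_Icc]; omega
        rw [hcard]; ring
      · ring
    · rw [pvPowLoop, dif_neg (by tauto)]
      split_ifs with hcond
      · have hempty : Finset.Icc e (padicValNat P j) = ∅ := by
          rw [Finset.Icc_eq_empty_iff]
          intro hle2
          have hdvd : P ^ e ∣ j := by
            rw [← Nat.factorization_def j hP] at hle2
            exact (hP.pow_dvd_iff_le_factorization (by omega)).mpr hle2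
          have := Nat.le_of_dvd (by omega) hdvd
          have hc : ((P:Int))^e ≤ (j:Int) := by exact_mod_cast this
          omega
        simp [hempty]
      · simp

def pvOm (j : ℕ) : ℕ := j.primeFactorsList.length

def pvG (a j : ℕ) : ℕ := ((Finset.range a).filter Nat.Prime).sum (fun p => padicValNat p j)

theorem pv_g_succ (a j : ℕ) :
    pvG (a + 1) j = pvG a j + (if a.Prime then padicValNat a j else 0) := by
  unfold pvG
  rw [Finset.range_add_one, Finset.filter_insert]
  split_ifs with h
  · rw [Finset.sum_insert (by simp)]
    ring
  · simp

theorem pv_g_two (j : ℕ) : pvG 2 j = 0 := by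
  have : (Finset.range 2).filter Nat.Prime = ∅ := by decide
  simp [pvG, this]

theorem pv_g_zero (a : ℕ) : pvG a 0 = 0 := by
  simp [pvG, padicValNat]

theorem pv_g_prime_test (n : ℕ) (h2 : 2 ≤ n) : pvG n n = 0 ↔ n.Prime := by
  constructor
  · intro h0
    by_contra hnp
    have hq : n.minFac.Prime := Nat.minFac_prime (by omega)
    have hqlt : n.minFac < n := by
      rcases Nat.lt_or_ge n.minFac n with h | h
      · exact h
      · exact absurd (Nat.prime_def_minFac.mpr ⟨h2, le_antisymm (Nat.minFac_le (by omega)) h⟩) hnp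
    have hqv : 1 ≤ padicValNat n.minFac n := by
      have : n.minFac ^ 1 ∣ n := by simpa using Nat.minFac_dvd n
      rw [← Nat.factorization_def n hq]
      exact (hq.pow_dvd_iff_le_factorization (by omega)).mp this
    have hmem : n.minFac ∈ (Finset.range n).filter Nat.Prime := by
      simp [Finset.mem_filter, hqlt, hq]
    have hle : (1:ℕ) ≤ pvG n n :=
      le_trans hqv (Finset.single_le_sum (f := fun p => padicValNat p n)
        (fun i _ => Nat.zero_le _) hmem)
    omega
  · intro hp
    unfold pvG
    refine Finset.sum_eq_zero ?_
    intro p hpm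
    rw [Finset.mem_filter, Finset.mem_range] at hpm
    refine padicValNat.eq_zero_of_not_dvd ?_
    intro hdvd
    rcases (hp.eq_one_or_self_of_dvd p hdvd) with h | h
    · exact hpm.2.one_lt.ne' h
    · omega

theorem pv_outer (N : Int) (k : ℕ) :
    ∀ (a : Int) (om : List Int), 2 ≤ a → (N + 1 - a).toNat ≤ k →
      om.length = (N + 1).toNat →
      (∀ j < om.length, om.getD j 0 = (pvG a.toNat j : Int)) →
      ∀ j < om.length,
        (((PySem.List.pyRange a (N + 1) 1).foldl
            (fun om p => if om.getD p.toNat 0 == 0 then pvPowLoop N p p om else om) om).getD j 0)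
          = (pvG (max a.toNat (N + 1).toNat) j : Int) := by
  induction k with
  | zero =>
    intro a om ha hk hlen hinv j hj
    have hnil : PySem.List.pyRange a (N + 1) 1 = [] := by
      rw [PySem.List.pyRange_of_pos _ _ one_pos, if_neg (by omega : ¬ a < N + 1)]
      simp
    rw [hnil]
    simp only [List.foldl_nil]
    rw [max_eq_left (by omega)]
    exact hinv j hj
  | succ k ih =>
    intro a om ha hk hlen hinv j hj
    by_cases hlt : a < N + 1
    · rw [PySem.List.pyRange_one_cons hlt]
      simp only [List.foldl_cons]
      have ha2 : 2 ≤ a.toNat := by omega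
      have haL : a.toNat < om.length := by omega
      have hval : om.getD a.toNat 0 = (pvG a.toNat a.toNat : Int) := hinv a.toNat haL
      have hcast : ((a.toNat : ℕ) : Int) = a := Int.toNat_of_nonneg (by omega)
      have hmaxgoal : max a.toNat (N + 1).toNat = (N + 1).toNat := max_eq_right (by omega)
      have hmax1 : max (a + 1).toNat (N + 1).toNat = (N + 1).toNat := max_eq_right (by omega)
      have htn1 : (a + 1).toNat = a.toNat + 1 := by omega
      by_cases hp : (a.toNat).Prime
      · have hz : pvG a.toNat a.toNat = 0 := (pv_g_prime_test _ ha2).mpr hp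
        have hc : (om.getD a.toNat 0 == 0) = true := by
          rw [hval, hz]; simp
        rw [if_pos hc]
        have hpl := pvPowLoop_getD a.toNat hp N (N + 1 - a).toNat 1
          om (by omega) (by rw [pow_one, hcast]) hlen
        have hinv' : ∀ j' < (pvPowLoop N a a om).length,
            (pvPowLoop N a a om).getD j' 0 = (pvG (a + 1).toNat j' : Int) := by
          intro j' hj'
          rw [pvPowLoop_length] at hj'
          have : pvPowLoop N a a om = pvPowLoop N (a.toNat : Int) ((a.toNat : Int) ^ 1) om := by
            rw [pow_one, hcast]
          rw [this, hpl j', htn1, pv_g_succ, if_pos hp]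
          rcases Nat.eq_zero_or_pos j' with rfl | hjpos
          · rw [if_neg (by omega)]
            have h0 := hinv 0 hj'
            rw [pv_g_zero] at h0
            simp [pv_g_zero, padicValNat]
            simpa [List.getD_eq_getElem?_getD] using h0
          · have hjN : (j' : Int) ≤ N := by omega
            rw [if_pos ⟨hjpos, hjN⟩, hinv j' hj', Nat.card_Icc]
            push_cast [Nat.add_sub_cancel]
            ring
        have := ih (a + 1) (pvPowLoop N a a om) (by omega) (by omega)
          (by rw [pvPowLoop_length]; exact hlen) hinv' j
          (by rw [pvPowLoop_length]; exact hj)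
        rw [this, hmax1, hmaxgoal]
      · have hz : pvG a.toNat a.toNat ≠ 0 := fun h => hp ((pv_g_prime_test _ ha2).mp h)
        have hc : ¬ ((om.getD a.toNat 0 == 0) = true) := by
          rw [hval]; simp; exact_mod_cast hz
        rw [if_neg hc]
        have hinv' : ∀ j' < om.length, om.getD j' 0 = (pvG (a + 1).toNat j' : Int) := by
          intro j' hj'
          rw [htn1, pv_g_succ, if_neg hp, Nat.add_zero]
          exact hinv j' hj'
        have := ih (a + 1) om (by omega) (by omega) hlen hinv' j hj
        rw [this, hmax1, hmaxgoal]
    · have : (N + 1 - a).toNat = 0 := by omega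
      have hnil : PySem.List.pyRange a (N + 1) 1 = [] := by
        rw [PySem.List.pyRange_of_pos _ _ one_pos, if_neg hlt]
        simp
      rw [hnil]
      simp only [List.foldl_nil]
      rw [max_eq_left (by omega)]
      exact hinv j hj

theorem pvOm_rec (j : ℕ) (h2 : 2 ≤ j) : pvOm j = pvOm (j / j.minFac) + 1 := by
  have hrec : j.primeFactorsList = j.minFac :: (j / j.minFac).primeFactorsList := by
    obtain ⟨m, rfl⟩ : ∃ m, j = m + 2 := ⟨j - 2, by omega⟩
    rw [Nat.primeFactorsList]
  unfold pvOm
  rw [hrec, List.length_cons]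

theorem pvG_eq_Om (P : ℕ) : ∀ j, j < P → pvG P j = pvOm j := by
  intro j
  induction j using Nat.strong_induction_on with
  | _ j ih =>
    intro hjP
    by_cases hj2 : 2 ≤ j
    · have hq : j.minFac.Prime := Nat.minFac_prime (by omega)
      have hqd : j.minFac ∣ j := Nat.minFac_dvd j
      have hqj' : j.minFac * (j / j.minFac) = j := Nat.mul_div_cancel' hqd
      have hj'pos : 0 < j / j.minFac := Nat.div_pos (Nat.minFac_le (by omega)) hq.pos
      have hj'lt : j / j.minFac < j := Nat.div_lt_self (by omega) hq.one_lt
      have hsplit : ∀ p ∈ (Finset.range P).filter Nat.Prime,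
          padicValNat p j = padicValNat p j.minFac + padicValNat p (j / j.minFac) := by
        intro p hpm
        rw [Finset.mem_filter] at hpm
        haveI : Fact p.Prime := ⟨hpm.2⟩
        calc padicValNat p j = padicValNat p (j.minFac * (j / j.minFac)) := by rw [hqj']
          _ = _ := padicValNat.mul hq.ne_zero (by omega)
      have hsq : ((Finset.range P).filter Nat.Prime).sum (fun p => padicValNat p j.minFac) = 1 := by
        rw [Finset.sum_eq_single_of_mem j.minFac
          (Finset.mem_filter.mpr ⟨Finset.mem_range.mpr
            (lt_of_le_of_lt (Nat.minFac_le (by omega)) hjP), hq⟩)]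
        · exact padicValNat.self hq.one_lt
        · intro p hpm hne
          rw [Finset.mem_filter] at hpm
          refine padicValNat.eq_zero_of_not_dvd ?_
          intro hdvd
          exact hne ((Nat.prime_dvd_prime_iff_eq hpm.2 hq).mp hdvd)
      have : pvG P j = 1 + pvG P (j / j.minFac) := by
        unfold pvG
        rw [Finset.sum_congr rfl hsplit, Finset.sum_add_distrib, hsq]
      rw [this, ih _ hj'lt (lt_trans hj'lt hjP), pvOm_rec j hj2]
      ring
    · interval_cases j
      · simp [pv_g_zero, pvOm]
      · simp [pvG, pvOm, padicValNat_one_right]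

theorem pvA_length (N : Int) : (sieve_omega N).length = (N + 1).toNat := by
  rw [sieve_omega, pv_foldl_length _ (fun s x => by
    split_ifs
    · rw [pvPowLoop_length]
    · rfl)]
  exact List.length_replicate

theorem pvA_getD (N : Int) : ∀ j < (N + 1).toNat, (sieve_omega N).getD j 0 = (pvOm j : Int) := by
  intro j hj
  have hlen : (List.replicate (N + 1).toNat (0:Int)).length = (N + 1).toNat :=
    List.length_replicate
  have hinv : ∀ j' < (List.replicate (N + 1).toNat (0:Int)).length,
      (List.replicate (N + 1).toNat (0:Int)).getD j' 0 = (pvG (2:Int).toNat j' : Int) := by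
    intro j' _
    rw [pv_getD_replicate]
    norm_num [pv_g_two]
  have h := pv_outer N (N + 1 - 2).toNat 2 _ (by omega) (le_refl _) hlen hinv j (by omega)
  rw [sieve_omega, h]
  by_cases hL : 2 ≤ (N + 1).toNat
  · rw [show ((2:Int).toNat = 2) from rfl, max_eq_right hL, pvG_eq_Om _ j hj]
  · have : j = 0 := by omega
    subst this
    rw [pv_g_zero]
    simp [pvOm]

theorem pv_condSet_getD (v : Int) (hv : v ≠ 0) : ∀ (ms : List Int), (∀ m ∈ ms, 0 ≤ m) →
    ∀ (s : List Int) (j : ℕ),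
    ((ms.foldl (fun s m => if s.getD m.toNat 0 == 0 then s.set m.toNat v else s) s).getD j 0)
      = if (j : Int) ∈ ms ∧ j < s.length ∧ s.getD j 0 = 0 then v else s.getD j 0 := by
  intro ms
  induction ms with
  | nil => intro _ s j; simp
  | cons m t ih =>
    intro h0 s j
    have hm0 : 0 ≤ m := h0 m (by simp)
    simp only [List.foldl_cons]
    by_cases hj : m = ((j:ℕ):Int)
    · subst hj
      simp only [Int.toNat_natCast] at *
      by_cases hz : s.getD j 0 = 0
      · have hc : (s.getD j 0 == 0) = true := by rwa [beq_iff_eq]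
        rw [if_pos hc]
        by_cases hlt : j < s.length
        · have hset : (s.set j v).getD j 0 = v := by
            rw [pv_getD_set, if_pos ⟨rfl, hlt⟩]
          rw [ih (fun x hx => h0 x (by simp [hx])) (s.set j v) j, hset]
          rw [if_neg (by intro hc2; exact hv hc2.2.2)]
          rw [if_pos ⟨by simp, hlt, hz⟩]
        · have hset : (s.set j v).getD j 0 = 0 := by
            rw [pv_getD_set, if_neg (by intro hc2; exact hlt hc2.2)]
            exact hz
          rw [ih (fun x hx => h0 x (by simp [hx])) (s.set j v) j, hset]
          rw [if_neg (by intro hc2; rw [List.length_set] at hc2; exact hlt hc2.2.1)]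
          rw [if_neg (by intro hc2; exact hlt hc2.2.1), hz]
      · have hc : ¬ ((s.getD j 0 == 0) = true) := by simpa only [beq_iff_eq] using hz
        rw [if_neg hc]
        rw [ih (fun x hx => h0 x (by simp [hx])) s j]
        rw [if_neg (by intro hc2; exact hz hc2.2.2)]
        rw [if_neg (by intro hc2; exact hz hc2.2.2)]
    · have hmj : m.toNat ≠ j := by omega
      have hkey : ∀ s' : List Int,
          (if s'.getD m.toNat 0 == 0 then s'.set m.toNat v else s') = s' ∨
          (if s'.getD m.toNat 0 == 0 then s'.set m.toNat v else s') = s'.set m.toNat v := by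
        intro s'
        by_cases hcc : (s'.getD m.toNat 0 == 0) = true
        · exact Or.inr (if_pos hcc)
        · exact Or.inl (if_neg hcc)
      have hiff : ((j:Int) ∈ t) ↔ ((j:Int) ∈ m :: t) := by
        rw [List.mem_cons]
        exact (or_iff_right (fun h => hj h.symm)).symm
      rcases hkey s with heq | heq <;> rw [heq, ih (fun x hx => h0 x (by simp [hx])) _ j]
      · exact if_congr (and_congr_left' hiff) rfl rfl
      · have hlen : (s.set m.toNat v).length = s.length := List.length_set ..
        have hgd : (s.set m.toNat v).getD j 0 = s.getD j 0 := by
          rw [pv_getD_set, if_neg (by intro hc2; exact hmj hc2.1.symm)]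
        rw [hgd, hlen]
        exact if_congr (and_congr_left' hiff) rfl rfl

def pvM (a j : ℕ) : Int := if 2 ≤ j ∧ j.minFac < a then (j.minFac : Int) else 0

theorem pvM_succ_prime (a j : ℕ) :
    pvM (a + 1) j = if 2 ≤ j ∧ j.minFac = a then (a : Int) else pvM a j := by
  unfold pvM
  by_cases h1 : 2 ≤ j ∧ j.minFac = a
  · rw [if_pos ⟨h1.1, by omega⟩, if_pos h1, h1.2]
  · by_cases h2 : 2 ≤ j ∧ j.minFac < a
    · rw [if_pos ⟨h2.1, by omega⟩, if_neg h1, if_pos h2]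
    · rw [if_neg (by intro hc; rcases Nat.lt_succ_iff_lt_or_eq.mp hc.2 with h | h
                     exacts [h2 ⟨hc.1, h⟩, h1 ⟨hc.1, h⟩]), if_neg h1, if_neg h2]

theorem pvM_succ_notprime (a j : ℕ) (ha : ¬ a.Prime) : pvM (a + 1) j = pvM a j := by
  unfold pvM
  by_cases h2 : 2 ≤ j ∧ j.minFac < a
  · rw [if_pos ⟨h2.1, by omega⟩, if_pos h2]
  · by_cases h1 : 2 ≤ j ∧ j.minFac = a
    · exact absurd (h1.2 ▸ Nat.minFac_prime (by omega)) ha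
    · rw [if_neg (by intro hc; rcases Nat.lt_succ_iff_lt_or_eq.mp hc.2 with h | h
                     exacts [h2 ⟨hc.1, h⟩, h1 ⟨hc.1, h⟩]), if_neg h2]

theorem pvM_two (j : ℕ) : pvM 2 j = 0 := by
  unfold pvM
  rw [if_neg]
  intro ⟨h1, h2⟩
  have : 2 ≤ j.minFac := (Nat.minFac_prime (by omega)).two_le
  omega

theorem pvM_prime_test (n : ℕ) (h2 : 2 ≤ n) : pvM n n = 0 ↔ n.Prime := by
  unfold pvM
  constructor
  · intro h
    by_cases hlt : n.minFac < n
    · rw [if_pos ⟨h2, hlt⟩] at h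
      have : 2 ≤ n.minFac := (Nat.minFac_prime (by omega)).two_le
      omega
    · have : n.minFac ≤ n := Nat.minFac_le (by omega)
      exact Nat.prime_def_minFac.mpr ⟨h2, by omega⟩
  · intro hp
    rw [if_neg (by intro hc; have := Nat.prime_def_minFac.mp hp; omega)]

theorem pv_spf_outer (N : Int) (k : ℕ) :
    ∀ (a : Int) (s : List Int), 2 ≤ a → (N + 1 - a).toNat ≤ k →
      s.length = (N + 1).toNat →
      (∀ j < s.length, s.getD j 0 = pvM a.toNat j) →
      ∀ j < s.length,
        (((PySem.List.pyRange a (N + 1) 1).foldl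
            (fun s i => if s.getD i.toNat 0 == 0 then
                (PySem.List.pyRange i (N + 1) i).foldl
                  (fun s j => if s.getD j.toNat 0 == 0 then s.set j.toNat i else s) s
              else s) s).getD j 0)
          = pvM (max a.toNat (N + 1).toNat) j := by
  induction k with
  | zero =>
    intro a s ha hk hlen hinv j hj
    have hnil : PySem.List.pyRange a (N + 1) 1 = [] := by
      rw [PySem.List.pyRange_of_pos _ _ one_pos, if_neg (by omega : ¬ a < N + 1)]
      simp
    rw [hnil]
    simp only [List.foldl_nil]
    rw [max_eq_left (by omega)]
    exact hinv j hj
  | succ k ih =>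
    intro a s ha hk hlen hinv j hj
    by_cases hlt : a < N + 1
    · rw [PySem.List.pyRange_one_cons hlt]
      simp only [List.foldl_cons]
      have ha2 : 2 ≤ a.toNat := by omega
      have haL : a.toNat < s.length := by omega
      have hval : s.getD a.toNat 0 = pvM a.toNat a.toNat := hinv a.toNat haL
      have hcast : ((a.toNat : ℕ) : Int) = a := Int.toNat_of_nonneg (by omega)
      have hmaxgoal : max a.toNat (N + 1).toNat = (N + 1).toNat := max_eq_right (by omega)
      have hmax1 : max (a + 1).toNat (N + 1).toNat = (N + 1).toNat := max_eq_right (by omega)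
      have htn1 : (a + 1).toNat = a.toNat + 1 := by omega
      by_cases hp : (a.toNat).Prime
      · have hz : pvM a.toNat a.toNat = 0 := (pvM_prime_test _ ha2).mpr hp
        have hc : (s.getD a.toNat 0 == 0) = true := by rw [hval, hz]; rfl
        rw [if_pos hc]
        have hmem := fun x => PySem.List.mem_pyRange_iff_of_pos
          (a := a) (b := N + 1) (by omega : (0:Int) < a) x
        set s' := (PySem.List.pyRange a (N + 1) a).foldl
          (fun s j => if s.getD j.toNat 0 == 0 then s.set j.toNat a else s) s with hs'
        have hlen' : s'.length = s.length := by
          rw [hs']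
          exact pv_foldl_length _ (fun st x => by
            split_ifs
            · exact List.length_set ..
            · rfl) _ s
        have hinv' : ∀ j' < s'.length, s'.getD j' 0 = pvM (a + 1).toNat j' := by
          intro j' hj'
          rw [hlen'] at hj'
          rw [hs', pv_condSet_getD a (by omega) _
            (fun m hm => by have := (hmem m).mp hm; omega) s j']
          rw [htn1, pvM_succ_prime _ _]
          by_cases hmc : 2 ≤ j' ∧ j'.minFac = a.toNat
          · have hminle : a.toNat ≤ j' := hmc.2 ▸ (Nat.le_of_dvd (by omega) (Nat.minFac_dvd j'))
            have hdvdn : a.toNat ∣ j' := hmc.2 ▸ Nat.minFac_dvd j'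
            have hdvdi : a ∣ ((j' : ℕ) : Int) := by
              rw [← hcast]; exact_mod_cast hdvdn
            have hmemj : ((j' : ℕ) : Int) ∈ PySem.List.pyRange a (N + 1) a := by
              refine (hmem _).mpr ⟨by omega, by omega, (dvd_sub_right hdvdi).mpr dvd_rfl⟩
            have hz' : s.getD j' 0 = 0 := by
              rw [hinv j' (by omega)]
              unfold pvM
              rw [if_neg (by intro hc2; omega)]
            rw [if_pos ⟨hmemj, by omega, hz'⟩, if_pos hmc, hcast]
          · rw [if_neg ?_, if_neg hmc]
            · exact hinv j' (by omega)
            · intro ⟨hmemj, hjlen, hzero⟩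
              have hm := (hmem _).mp hmemj
              have h2j : 2 ≤ j' := by omega
              have hdvdi : a ∣ ((j' : ℕ) : Int) := by
                obtain ⟨c, hc2⟩ := hm.2.2
                exact ⟨c + 1, by linarith⟩
              have hdvdn : a.toNat ∣ j' := by
                rw [← hcast] at hdvdi
                exact_mod_cast hdvdi
              have hle1 : j'.minFac ≤ a.toNat := Nat.minFac_le_of_dvd ha2 hdvdn
              have hge : a.toNat ≤ j'.minFac := by
                have := hinv j' (by omega)
                rw [this] at hzero
                unfold pvM at hzero
                by_cases hcc : 2 ≤ j' ∧ j'.minFac < a.toNat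
                · rw [if_pos hcc] at hzero
                  have : 2 ≤ j'.minFac := (Nat.minFac_prime (by omega)).two_le
                  omega
                · omega
              exact hmc ⟨h2j, by omega⟩
        have := ih (a + 1) s' (by omega) (by omega) (by rw [hlen']; exact hlen) hinv' j
          (by rw [hlen']; exact hj)
        rw [this, hmax1, hmaxgoal]
      · have hz : pvM a.toNat a.toNat ≠ 0 := fun h => hp ((pvM_prime_test _ ha2).mp h)
        have hc : ¬ ((s.getD a.toNat 0 == 0) = true) := by
          rw [hval]; simpa only [beq_iff_eq] using hz
        rw [if_neg hc]
        have hinv' : ∀ j' < s.length, s.getD j' 0 = pvM (a + 1).toNat j' := by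
          intro j' hj'
          rw [htn1, pvM_succ_notprime _ _ hp]
          exact hinv j' hj'
        have := ih (a + 1) s (by omega) (by omega) hlen hinv' j hj
        rw [this, hmax1, hmaxgoal]
    · have hnil : PySem.List.pyRange a (N + 1) 1 = [] := by
        rw [PySem.List.pyRange_of_pos _ _ one_pos, if_neg hlt]
        simp
      rw [hnil]
      simp only [List.foldl_nil]
      rw [max_eq_left (by omega)]
      exact hinv j hj

theorem pv_spf_final (N : Int) :
    ∀ j < (N + 1).toNat,
      (((PySem.List.pyRange 2 (N + 1) 1).foldl
          (fun s i => if s.getD i.toNat 0 == 0 then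
              (PySem.List.pyRange i (N + 1) i).foldl
                (fun s j => if s.getD j.toNat 0 == 0 then s.set j.toNat i else s) s
            else s) (List.replicate (N + 1).toNat 0)).getD j 0)
        = if 2 ≤ j then ((j.minFac : ℕ) : Int) else 0 := by
  intro j hj
  have hlen : (List.replicate (N + 1).toNat (0:Int)).length = (N + 1).toNat :=
    List.length_replicate
  have hinv : ∀ j' < (List.replicate (N + 1).toNat (0:Int)).length,
      (List.replicate (N + 1).toNat (0:Int)).getD j' 0 = pvM (2:Int).toNat j' := by
    intro j' _
    rw [pv_getD_replicate, show ((2:Int).toNat = 2) from rfl, pvM_two]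
  have h := pv_spf_outer N (N + 1 - 2).toNat 2 _ (by omega) (le_refl _) hlen hinv j (by omega)
  rw [h]
  by_cases h2 : 2 ≤ j
  · have hL : 2 ≤ (N + 1).toNat := by omega
    rw [show ((2:Int).toNat = 2) from rfl, max_eq_right hL]
    unfold pvM
    rw [if_pos ⟨h2, lt_of_le_of_lt (Nat.minFac_le (by omega)) hj⟩, if_pos h2]
  · unfold pvM
    rw [if_neg (by intro hc; exact h2 hc.1), if_neg h2]

def pvSpfList (N : Int) : List Int :=
  (PySem.List.pyRange 2 (N + 1) 1).foldl
    (fun s i => if s.getD i.toNat 0 == 0 then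
        (PySem.List.pyRange i (N + 1) i).foldl
          (fun s j => if s.getD j.toNat 0 == 0 then s.set j.toNat i else s) s
      else s)
    (List.replicate (N + 1).toNat 0)

theorem pvB_eq (N : Int) : sieve_omega_alt N
    = (PySem.List.pyRange 2 (N + 1) 1).foldl
        (fun om i =>
          om.set i.toNat
            (om.getD (PySem.Int.floordiv i ((pvSpfList N).getD i.toNat 0)).toNat 0 + 1))
        (List.replicate (N + 1).toNat 0) := rfl

theorem pvB_length (N : Int) : (sieve_omega_alt N).length = (N + 1).toNat := by
  rw [pvB_eq, pv_foldl_length _ (fun s x => List.length_set ..)]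
  exact List.length_replicate

theorem pv_dp (N : Int) (spf : List Int)
    (hspf : ∀ j < (N + 1).toNat, spf.getD j 0 = if 2 ≤ j then ((j.minFac : ℕ) : Int) else 0)
    (k : ℕ) :
    ∀ (a : Int) (om : List Int), 2 ≤ a → (N + 1 - a).toNat ≤ k →
      om.length = (N + 1).toNat →
      (∀ j < om.length, om.getD j 0 = if 2 ≤ j ∧ j < a.toNat then (pvOm j : Int) else 0) →
      ∀ j < om.length,
        (((PySem.List.pyRange a (N + 1) 1).foldl
            (fun om i =>
              om.set i.toNat (om.getD (PySem.Int.floordiv i (spf.getD i.toNat 0)).toNat 0 + 1)) om).getD j 0)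
          = if 2 ≤ j ∧ j < max a.toNat (N + 1).toNat then (pvOm j : Int) else 0 := by
  induction k with
  | zero =>
    intro a om ha hk hlen hinv j hj
    have hnil : PySem.List.pyRange a (N + 1) 1 = [] := by
      rw [PySem.List.pyRange_of_pos _ _ one_pos, if_neg (by omega : ¬ a < N + 1)]
      simp
    rw [hnil]
    simp only [List.foldl_nil]
    rw [max_eq_left (by omega)]
    exact hinv j hj
  | succ k ih =>
    intro a om ha hk hlen hinv j hj
    by_cases hlt : a < N + 1
    · rw [PySem.List.pyRange_one_cons hlt]
      simp only [List.foldl_cons]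
      have ha2 : 2 ≤ a.toNat := by omega
      have haL : a.toNat < om.length := by omega
      have hcast : ((a.toNat : ℕ) : Int) = a := Int.toNat_of_nonneg (by omega)
      have hmaxgoal : max a.toNat (N + 1).toNat = (N + 1).toNat := max_eq_right (by omega)
      have hmax1 : max (a + 1).toNat (N + 1).toNat = (N + 1).toNat := max_eq_right (by omega)
      have htn1 : (a + 1).toNat = a.toNat + 1 := by omega
      have hq : a.toNat.minFac.Prime := Nat.minFac_prime (by omega)
      have hsp : spf.getD a.toNat 0 = ((a.toNat.minFac : ℕ) : Int) := by
        rw [hspf a.toNat (by omega), if_pos ha2]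
      have hfd : PySem.Int.floordiv a (spf.getD a.toNat 0)
          = ((a.toNat / a.toNat.minFac : ℕ) : Int) := by
        rw [hsp]
        calc PySem.Int.floordiv a ((a.toNat.minFac : ℕ) : Int)
            = PySem.Int.floordiv ((a.toNat : ℕ) : Int) ((a.toNat.minFac : ℕ) : Int) := by
              rw [hcast]
          _ = _ := PySem.Int.floordiv_natCast _ _
      have hqlt : a.toNat / a.toNat.minFac < a.toNat := Nat.div_lt_self (by omega) hq.one_lt
      have hqpos : 0 < a.toNat / a.toNat.minFac :=
        Nat.div_pos (Nat.minFac_le (by omega)) hq.pos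
      have hrd : om.getD (a.toNat / a.toNat.minFac) 0 = (pvOm (a.toNat / a.toNat.minFac) : Int) := by
        rw [hinv _ (by omega)]
        by_cases h2q : 2 ≤ a.toNat / a.toNat.minFac
        · rw [if_pos ⟨h2q, hqlt⟩]
        · have : a.toNat / a.toNat.minFac = 1 := by omega
          rw [this, if_neg (by omega)]
          simp [pvOm]
      set om' := om.set a.toNat
        (om.getD (PySem.Int.floordiv a (spf.getD a.toNat 0)).toNat 0 + 1) with hom'
      have hlen' : om'.length = om.length := List.length_set ..
      have hinv' : ∀ j' < om'.length, om'.getD j' 0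
          = if 2 ≤ j' ∧ j' < (a + 1).toNat then (pvOm j' : Int) else 0 := by
        intro j' hj'
        rw [hlen'] at hj'
        rw [hom', pv_getD_set]
        by_cases hje : j' = a.toNat
        · subst hje
          rw [if_pos ⟨rfl, haL⟩, hfd, Int.toNat_natCast, hrd, htn1,
            if_pos ⟨ha2, by omega⟩]
          rw [pvOm_rec a.toNat (by omega)]
          push_cast; ring
        · rw [if_neg (by intro hc; exact hje hc.1), hinv j' hj', htn1]
          by_cases hc2 : 2 ≤ j' ∧ j' < a.toNat
          · rw [if_pos hc2, if_pos ⟨hc2.1, by omega⟩]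
          · rw [if_neg hc2, if_neg (by intro hc; exact hc2 ⟨hc.1, by omega⟩)]
      have := ih (a + 1) om' (by omega) (by omega) (by rw [hlen']; exact hlen) hinv' j
        (by rw [hlen']; exact hj)
      rw [this, hmax1, hmaxgoal]
    · have hnil : PySem.List.pyRange a (N + 1) 1 = [] := by
        rw [PySem.List.pyRange_of_pos _ _ one_pos, if_neg hlt]
        simp
      rw [hnil]
      simp only [List.foldl_nil]
      rw [max_eq_left (by omega)]
      exact hinv j hj

theorem pvB_getD (N : Int) : ∀ j < (N + 1).toNat, (sieve_omega_alt N).getD j 0 = (pvOm j : Int) := by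
  intro j hj
  have hlen : (List.replicate (N + 1).toNat (0:Int)).length = (N + 1).toNat :=
    List.length_replicate
  have hinv : ∀ j' < (List.replicate (N + 1).toNat (0:Int)).length,
      (List.replicate (N + 1).toNat (0:Int)).getD j' 0
        = if 2 ≤ j' ∧ j' < (2:Int).toNat then (pvOm j' : Int) else 0 := by
    intro j' _
    rw [pv_getD_replicate, if_neg (by rw [show ((2:Int).toNat = 2) from rfl]; omega)]
  have h := pv_dp N (pvSpfList N) (pv_spf_final N) (N + 1 - 2).toNat 2 _
    (by omega) (le_refl _) hlen hinv j (by omega)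
  rw [pvB_eq, h]
  by_cases h2 : 2 ≤ j
  · rw [if_pos ⟨h2, by rw [show ((2:Int).toNat = 2) from rfl]; omega⟩]
  · rw [if_neg (by intro hc; exact h2 hc.1)]
    interval_cases j <;> simp [pvOm]

-- ===== VERDICT (by name: the statement is the Claim_ definition above) =====
theorem sieve_omega_spec : Claim_equal_sieve_omega := by
  intro N _
  show sieve_omega N = sieve_omega_alt N
  apply List.ext_getElem (by rw [pvA_length, pvB_length])
  intro i h1 h2
  have hA := pvA_getD N i (by rwa [pvA_length] at h1)
  have hB := pvB_getD N i (by rwa [pvB_length] at h2)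
  rw [List.getD_eq_getElem _ _ h1] at hA
  rw [List.getD_eq_getElem _ _ h2] at hB
  rw [hA, hB]
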